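-- pv_equiv track=rewrite | github.com/Kohdz/Algorithms | LeetCode/medium/77_graphValidTree.py | validTreeDFSRec
-- ===== SOURCE A (Python) =====
-- import collections
--
-- def validTreeDFSRec(n, edges):
--
--     # checks for cycle
--     if len(edges) != n - 1:
--         return False
--
--     graph = collections.defaultdict(list)
--
--     for u, v in edges:
--         graph[u].append(v)
--         graph[v].append(u)
--
--
--     def dfs(node):
--         for neighbor in graph[node]:
--             if neighbor not in visited:
--                 visited.add(neighbor)
--                 dfs(neighbor)
--
--     visited = set()
--     visited.add(0)
--     dfs(0)
--
--     return len(visited) == n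
-- ===== SOURCE B (Python) =====
-- def validTreeDFSRec(n, edges):
--     # Iterative frontier-by-frontier flood fill (BFS) instead of recursive DFS.
--     if len(edges) != n - 1:
--         return False
--
--     adj = {}
--     for u, v in edges:
--         adj.setdefault(u, []).append(v)
--         adj.setdefault(v, []).append(u)
--
--     seen = {0}
--     frontier = [0]
--     while frontier:
--         nxt = []
--         for x in frontier:
--             for y in adj.get(x, []):
--                 if y not in seen:
--                     seen.add(y)
--                     nxt.append(y)
--         frontier = nxt
--
--     return len(seen) == n
-- ===== Notes on version B (the rewrite author's own statement) =====
-- stated objective: alternative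
-- what changed: Replaces the recursive DFS exploration of node 0's component with an iterative frontier-by-frontier flood fill (BFS) driven by an explicit worklist instead of the call stack.
import Mathlib
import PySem

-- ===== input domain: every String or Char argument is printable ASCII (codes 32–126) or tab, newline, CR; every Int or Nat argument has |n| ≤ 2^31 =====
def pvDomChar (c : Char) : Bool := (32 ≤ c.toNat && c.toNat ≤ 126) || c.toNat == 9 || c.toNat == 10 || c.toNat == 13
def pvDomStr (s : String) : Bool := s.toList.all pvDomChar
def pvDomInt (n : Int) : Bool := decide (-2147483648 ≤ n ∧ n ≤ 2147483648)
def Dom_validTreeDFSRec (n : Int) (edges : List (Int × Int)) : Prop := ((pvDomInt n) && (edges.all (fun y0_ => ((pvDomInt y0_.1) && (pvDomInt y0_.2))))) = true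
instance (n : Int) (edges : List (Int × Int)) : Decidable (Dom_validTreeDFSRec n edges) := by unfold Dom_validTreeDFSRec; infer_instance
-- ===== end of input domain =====

-- B replaces A's recursive DFS with an iterative frontier-by-frontier flood fill (BFS); same cost, different traversal.
-- (Both Pythons build the identical adjacency map — A via defaultdict append, B via setdefault append — shared here as pvBuildAdj.)

-- ===== PORT A =====
-- adjacency build: for (u,v) in edges: graph[u].append(v); graph[v].append(u)  (defaultdict(list) ≡ modify with default [])
def pvBuildAdj (edges : List (Int × Int)) : PySem.Dict Int (List Int) :=
  edges.foldl (fun g e => (g.modify e.1 [] (· ++ [e.2])).modify e.2 [] (· ++ [e.1])) PySem.Dict.empty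

-- the recursive dfs; fuel only makes the same recursion total (each call first adds a fresh node to visited,
-- so 2*|edges|+1 levels are never exhausted)
def pvDfsA (g : PySem.Dict Int (List Int)) : Nat → Int → PySem.Set Int → PySem.Set Int
  | 0, _, vis => vis
  | fuel+1, node, vis =>
      (g.getD node []).foldl
        (fun v nb => if nb ∈ v then v else pvDfsA g fuel nb (PySem.Set.add v nb)) vis

def validTreeDFSRec (n : Int) (edges : List (Int × Int)) : Bool :=
  if (edges.length : Int) ≠ n - 1 then false
  else
    let graph := pvBuildAdj edges
    let visited := pvDfsA graph (2 * edges.length + 1) 0 (PySem.Set.add PySem.Set.empty 0)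
    PySem.Set.len visited == n

-- ===== PORT B =====
-- one round of the while-loop body: scan the frontier, collect unseen neighbours
def pvBfsRound (g : PySem.Dict Int (List Int)) (seen : PySem.Set Int) (frontier : List Int) :
    PySem.Set Int × List Int :=
  frontier.foldl
    (fun acc x =>
      (g.getD x []).foldl
        (fun acc y => if y ∈ acc.1 then acc else (PySem.Set.add acc.1 y, acc.2 ++ [y]))
        acc)
    (seen, [])

-- while frontier: …  (fuel only makes the loop total: every non-final round grows seen, 2*|edges|+2 rounds suffice)
def pvBfsLoop (g : PySem.Dict Int (List Int)) : Nat → PySem.Set Int → List Int → PySem.Set Int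
  | 0, seen, _ => seen
  | fuel+1, seen, frontier =>
      if frontier.isEmpty then seen
      else
        let r := pvBfsRound g seen frontier
        pvBfsLoop g fuel r.1 r.2

def validTreeDFSRec_alt (n : Int) (edges : List (Int × Int)) : Bool :=
  if (edges.length : Int) ≠ n - 1 then false
  else
    let adj := pvBuildAdj edges
    let seen := pvBfsLoop adj (2 * edges.length + 2) (PySem.Set.add PySem.Set.empty 0) [0]
    PySem.Set.len seen == n

-- ===== PRECONDITION & SPEC =====
def Spec_validTreeDFSRec (n : Int) (edges : List (Int × Int)) (out : Bool) : Prop := out = validTreeDFSRec_alt n edges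
instance (n : Int) (edges : List (Int × Int)) (out : Bool) : Decidable (Spec_validTreeDFSRec n edges out) := by unfold Spec_validTreeDFSRec; infer_instance

-- ===== CLAIM (what is proved, stated in full; the proofs are below) =====
def Claim_equal_validTreeDFSRec : Prop := ∀ (n : Int) (edges : List (Int × Int)), Dom_validTreeDFSRec n edges → Spec_validTreeDFSRec n edges (validTreeDFSRec n edges)

-- ===== LEMMAS AND PROOFS =====

-- universe of node labels either program can ever visit
def pvU (edges : List (Int × Int)) : List Int := 0 :: edges.flatMap (fun e => [e.1, e.2])

def pvAdjP (edges : List (Int × Int)) (x y : Int) : Prop := (x, y) ∈ edges ∨ (y, x) ∈ edges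

def pvReach (edges : List (Int × Int)) (x : Int) : Prop :=
  Relation.ReflTransGen (pvAdjP edges) 0 x

-- measure: how many universe entries are still unvisited
def pvM (edges : List (Int × Int)) (s : List Int) : Nat :=
  (pvU edges).countP (fun u => decide (u ∉ s))

lemma pv_mem_adj (edges : List (Int × Int)) (x y : Int) :
    y ∈ (pvBuildAdj edges).getD x [] ↔ pvAdjP edges x y := by
  have h : pvBuildAdj edges
      = (edges.flatMap fun e => [(e.1, e.2), (e.2, e.1)]).foldl
          (fun g p => g.modify p.1 [] (· ++ [p.2])) PySem.Dict.empty := by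
    rw [List.foldl_flatMap]; rfl
  rw [h, PySem.Dict.getD_foldl_modify_append]
  simp only [PySem.Dict.getD_empty, List.nil_append, List.mem_map, List.mem_filter,
    List.mem_flatMap, List.mem_cons, beq_iff_eq, pvAdjP]
  constructor
  · rintro ⟨p, ⟨⟨e, he, hp⟩, hpx⟩, hpy⟩
    simp only [List.not_mem_nil, or_false] at hp
    rcases hp with hp | hp <;> subst hp <;> simp only at hpx hpy <;> rw [← hpx, ← hpy]
    · exact Or.inl (by simpa using he)
    · exact Or.inr (by simpa using he)
  · rintro (he | he)
    · exact ⟨(x, y), ⟨⟨(x, y), he, by simp⟩, rfl⟩, rfl⟩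
    · exact ⟨(x, y), ⟨⟨(y, x), he, by simp⟩, rfl⟩, rfl⟩

lemma pv_adj_sub_U (edges : List (Int × Int)) (x : Int) :
    (pvBuildAdj edges).getD x [] ⊆ pvU edges := by
  intro y hy
  rcases (pv_mem_adj edges x y).1 hy with h | h <;>
    · simp only [pvU, List.mem_cons, List.mem_flatMap]
      right
      refine ⟨_, h, ?_⟩ <;> simp

lemma pv_sub_add (s : PySem.Set Int) (x : Int) : s ⊆ PySem.Set.add s x := by
  intro z hz
  exact (PySem.Set.mem_add _ _ _).2 (Or.inl hz)

lemma pv_add_sub_U {edges : List (Int × Int)} {s : PySem.Set Int} {x : Int}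
    (hs : s ⊆ pvU edges) (hx : x ∈ pvU edges) : PySem.Set.add s x ⊆ pvU edges := by
  intro z hz
  rcases (PySem.Set.mem_add _ _ _).1 hz with h | h
  · exact hs h
  · exact h ▸ hx

lemma pvM_lt {edges : List (Int × Int)} {s t : List Int} (h : s ⊆ t) {x : Int}
    (hxU : x ∈ pvU edges) (hxs : x ∉ s) (hxt : x ∈ t) : pvM edges t < pvM edges s := by
  unfold pvM
  rw [List.countP_eq_length_filter, List.countP_eq_length_filter]
  have hsub : List.Sublist ((pvU edges).filter (fun u => decide (u ∉ t)))
      ((pvU edges).filter (fun u => decide (u ∉ s))) := by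
    apply List.monotone_filter_right
    intro a ha
    simp only [decide_eq_true_eq] at ha ⊢
    exact fun hs => ha (h hs)
  rcases Nat.lt_or_ge (((pvU edges).filter (fun u => decide (u ∉ t))).length)
      (((pvU edges).filter (fun u => decide (u ∉ s))).length) with hlt | hge
  · exact hlt
  · exfalso
    have heq := hsub.eq_of_length (Nat.le_antisymm hsub.length_le hge)
    have hx1 : x ∈ (pvU edges).filter (fun u => decide (u ∉ s)) := by
      simp only [List.mem_filter, decide_eq_true_eq]; exact ⟨hxU, hxs⟩
    rw [← heq] at hx1
    have := (List.mem_filter.1 hx1).2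
    simp only [decide_eq_true_eq] at this
    exact this hxt

lemma pvM_zero_lt (edges : List (Int × Int)) : pvM edges [0] < 2 * edges.length + 1 := by
  have hlen : (edges.flatMap fun e => [e.1, e.2]).length = 2 * edges.length := by
    induction edges with
    | nil => simp
    | cons e es ih => simp [ih]; omega
  have hle := List.countP_le_length (p := fun u : Int => decide (u ∉ ([0] : List Int)))
    (l := edges.flatMap fun e => [e.1, e.2])
  unfold pvM pvU
  rw [List.countP_cons]
  have h0 : (decide ((0 : Int) ∉ ([0] : List Int))) = false := by decide
  rw [h0]
  simp only [Bool.false_eq_true, if_false]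
  omega

-- generic: a fold whose step preserves P preserves P
lemma pv_foldl_pres {β : Type} (P : PySem.Set Int → Prop) (f : PySem.Set Int → β → PySem.Set Int) :
    ∀ (l : List β) (s : PySem.Set Int), (∀ s b, b ∈ l → P s → P (f s b)) → P s → P (l.foldl f s) := by
  intro l
  induction l with
  | nil => intro s _ hs; exact hs
  | cons b l ih =>
    intro s hstep hs
    exact ih (f s b) (fun s' b' hb' => hstep s' b' (List.mem_cons_of_mem _ hb'))
      (hstep s b (List.mem_cons_self) hs)

lemma pv_foldl_sub {β : Type} (f : PySem.Set Int → β → PySem.Set Int)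
    (hf : ∀ s b, s ⊆ f s b) : ∀ (l : List β) (s : PySem.Set Int), s ⊆ l.foldl f s := by
  intro l
  induction l with
  | nil => intro s; exact fun _ h => h
  | cons b l ih => intro s; exact List.Subset.trans (hf s b) (ih (f s b))

lemma pv_dfsA_sub (g : PySem.Dict Int (List Int)) :
    ∀ (fuel : Nat) (node : Int) (vis : PySem.Set Int), vis ⊆ pvDfsA g fuel node vis := by
  intro fuel
  induction fuel with
  | zero => intro node vis; exact fun _ h => h
  | succ fuel ih =>
    intro node vis
    simp only [pvDfsA]
    apply pv_foldl_sub
    intro s nb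
    by_cases h : nb ∈ s
    · simp [h]
    · simp only [h, if_false]
      exact List.Subset.trans (pv_sub_add s nb) (ih nb (PySem.Set.add s nb))

lemma pv_dfsA_nodup (g : PySem.Dict Int (List Int)) :
    ∀ (fuel : Nat) (node : Int) (vis : PySem.Set Int), vis.Nodup → (pvDfsA g fuel node vis).Nodup := by
  intro fuel
  induction fuel with
  | zero => intro node vis h; exact h
  | succ fuel ih =>
    intro node vis hv
    simp only [pvDfsA]
    apply pv_foldl_pres (fun s => s.Nodup)
    · intro s nb _ hs
      by_cases h : nb ∈ s
      · simpa [h]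
      · simp only [h, if_false]
        exact ih nb _ (PySem.Set.nodup_add _ _ hs)
    · exact hv

lemma pv_dfsA_sound (edges : List (Int × Int)) :
    ∀ (fuel : Nat) (node : Int) (vis : PySem.Set Int) (x : Int),
      x ∈ pvDfsA (pvBuildAdj edges) fuel node vis →
      x ∈ vis ∨ Relation.ReflTransGen (pvAdjP edges) node x := by
  intro fuel
  induction fuel with
  | zero => intro node vis x hx; exact Or.inl hx
  | succ fuel ih =>
    intro node vis x hx
    simp only [pvDfsA] at hx
    refine pv_foldl_pres (fun s => ∀ z ∈ s, z ∈ vis ∨ Relation.ReflTransGen (pvAdjP edges) node z)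
      _ _ vis ?_ (fun z hz => Or.inl hz) x hx
    intro s nb hnb hP z hz
    by_cases h : nb ∈ s
    · simp only [h, if_true] at hz; exact hP z hz
    · simp only [h, if_false] at hz
      have hadj : pvAdjP edges node nb := (pv_mem_adj edges node nb).1 hnb
      rcases ih nb (PySem.Set.add s nb) z hz with hz' | hz'
      · rcases (PySem.Set.mem_add _ _ _).1 hz' with hz'' | hz''
        · exact hP z hz''
        · exact Or.inr (hz'' ▸ Relation.ReflTransGen.single hadj)
      · exact Or.inr (Relation.ReflTransGen.head hadj hz')

-- the central DFS lemma: with adequate fuel the result contains node's neighbours, stays inside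
-- the universe, and every visited node is either initial or has all its neighbours visited
lemma pv_dfsA_main (edges : List (Int × Int)) :
    ∀ (fuel : Nat) (node : Int) (vis : PySem.Set Int),
      vis ⊆ pvU edges → pvM edges vis < fuel →
      ((pvBuildAdj edges).getD node [] ⊆ pvDfsA (pvBuildAdj edges) fuel node vis
       ∧ pvDfsA (pvBuildAdj edges) fuel node vis ⊆ pvU edges
       ∧ ∀ x ∈ pvDfsA (pvBuildAdj edges) fuel node vis,
           x ∈ vis ∨ (pvBuildAdj edges).getD x [] ⊆ pvDfsA (pvBuildAdj edges) fuel node vis) := by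
  intro fuel
  induction fuel with
  | zero => intro node vis _ hM; omega
  | succ fuel ih =>
    intro node vis hU hM
    have hMle : pvM edges vis ≤ fuel := Nat.lt_succ_iff.mp hM
    have inner : ∀ (l : List Int), l ⊆ pvU edges → ∀ (s : PySem.Set Int),
        vis ⊆ s → s ⊆ pvU edges →
        (∀ x ∈ s, x ∈ vis ∨ (pvBuildAdj edges).getD x [] ⊆ s) →
        (s ⊆ l.foldl (fun v nb => if nb ∈ v then v else pvDfsA (pvBuildAdj edges) fuel nb (PySem.Set.add v nb)) s
         ∧ l ⊆ l.foldl (fun v nb => if nb ∈ v then v else pvDfsA (pvBuildAdj edges) fuel nb (PySem.Set.add v nb)) s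
         ∧ l.foldl (fun v nb => if nb ∈ v then v else pvDfsA (pvBuildAdj edges) fuel nb (PySem.Set.add v nb)) s ⊆ pvU edges
         ∧ ∀ x ∈ l.foldl (fun v nb => if nb ∈ v then v else pvDfsA (pvBuildAdj edges) fuel nb (PySem.Set.add v nb)) s,
             x ∈ vis ∨ (pvBuildAdj edges).getD x [] ⊆
               l.foldl (fun v nb => if nb ∈ v then v else pvDfsA (pvBuildAdj edges) fuel nb (PySem.Set.add v nb)) s) := by
      intro l
      induction l with
      | nil =>
        intro _ s hvs hsU hQ
        exact ⟨fun _ h => h, by simp, hsU, hQ⟩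
      | cons nb l ihl =>
        intro hlU s hvs hsU hQ
        have hnbU : nb ∈ pvU edges := hlU List.mem_cons_self
        -- the one step
        set s' := if nb ∈ s then s else pvDfsA (pvBuildAdj edges) fuel nb (PySem.Set.add s nb) with hs'
        have hstep : s ⊆ s' ∧ nb ∈ s' ∧ vis ⊆ s' ∧ s' ⊆ pvU edges ∧
            (∀ x ∈ s', x ∈ vis ∨ (pvBuildAdj edges).getD x [] ⊆ s') := by
          by_cases h : nb ∈ s
          · have hse : s' = s := by rw [hs', if_pos h]
            rw [hse]
            exact ⟨fun _ h => h, h, hvs, hsU, hQ⟩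
          · have hse : s' = pvDfsA (pvBuildAdj edges) fuel nb (PySem.Set.add s nb) := by
              rw [hs', if_neg h]
            rw [hse]
            have hnv : nb ∉ vis := fun hh => h (hvs hh)
            have hM' : pvM edges (PySem.Set.add s nb) < fuel := by
              have h1 : pvM edges (PySem.Set.add s nb) < pvM edges vis := by
                apply pvM_lt (List.Subset.trans hvs (pv_sub_add s nb)) hnbU hnv
                exact (PySem.Set.mem_add _ _ _).2 (Or.inr rfl)
              omega
            have haddU : PySem.Set.add s nb ⊆ pvU edges := pv_add_sub_U hsU hnbU
            obtain ⟨h1, h2, h3⟩ := ih nb (PySem.Set.add s nb) haddU hM'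
            have hsr : PySem.Set.add s nb ⊆ pvDfsA (pvBuildAdj edges) fuel nb (PySem.Set.add s nb) :=
              pv_dfsA_sub _ _ _ _
            refine ⟨List.Subset.trans (pv_sub_add s nb) hsr,
              hsr ((PySem.Set.mem_add _ _ _).2 (Or.inr rfl)),
              List.Subset.trans hvs (List.Subset.trans (pv_sub_add s nb) hsr), h2, ?_⟩
            intro x hx
            rcases h3 x hx with hx' | hx'
            · rcases (PySem.Set.mem_add _ _ _).1 hx' with hx'' | hx''
              · rcases hQ x hx'' with hq | hq
                · exact Or.inl hq
                · exact Or.inr (List.Subset.trans hq (List.Subset.trans (pv_sub_add s nb) hsr))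
              · exact Or.inr (hx'' ▸ h1)
            · exact Or.inr hx'
        obtain ⟨hss', hnbs', hvs', hs'U, hQ'⟩ := hstep
        obtain ⟨ih1, ih2, ih3, ih4⟩ := ihl (fun z hz => hlU (List.mem_cons_of_mem _ hz)) s' hvs' hs'U hQ'
        simp only [List.foldl_cons, ← hs']
        refine ⟨List.Subset.trans hss' ih1, ?_, ih3, ih4⟩
        intro z hz
        rcases List.mem_cons.1 hz with hz' | hz'
        · exact hz' ▸ ih1 hnbs'
        · exact ih2 hz'
    obtain ⟨h1, h2, h3, h4⟩ := inner ((pvBuildAdj edges).getD node []) (pv_adj_sub_U edges node)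
      vis (fun _ h => h) hU (fun x hx => Or.inl hx)
    exact ⟨h2, h3, h4⟩

lemma pv_reach_sub (edges : List (Int × Int)) (V : List Int) (h0 : 0 ∈ V)
    (hcl : ∀ x ∈ V, (pvBuildAdj edges).getD x [] ⊆ V) :
    ∀ x, pvReach edges x → x ∈ V := by
  intro x hx
  induction hx with
  | refl => exact h0
  | tail _ hadj ih => exact hcl _ ih ((pv_mem_adj edges _ _).2 hadj)

lemma pv_zero_mem_U (edges : List (Int × Int)) : ([0] : List Int) ⊆ pvU edges := by
  intro z hz
  simp only [List.mem_singleton] at hz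
  simp [pvU, hz]

lemma pv_dfsA_char (edges : List (Int × Int)) (x : Int) :
    x ∈ pvDfsA (pvBuildAdj edges) (2 * edges.length + 1) 0 [0] ↔ pvReach edges x := by
  obtain ⟨h1, _, h3⟩ := pv_dfsA_main edges (2 * edges.length + 1) 0 [0]
    (pv_zero_mem_U edges) (pvM_zero_lt edges)
  constructor
  · intro hx
    rcases pv_dfsA_sound edges _ 0 [0] x hx with h | h
    · simp only [List.mem_singleton] at h
      exact h ▸ Relation.ReflTransGen.refl
    · exact h
  · apply pv_reach_sub
    · exact pv_dfsA_sub _ _ _ _ (List.mem_singleton.2 rfl)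
    · intro z hz
      rcases h3 z hz with h | h
      · simp only [List.mem_singleton] at h
        exact h ▸ h1
      · exact h

-- ===== BFS side =====

lemma pv_bfsLoop_nil (g : PySem.Dict Int (List Int)) :
    ∀ (fuel : Nat) (s : PySem.Set Int), pvBfsLoop g fuel s [] = s := by
  intro fuel s
  cases fuel <;> simp [pvBfsLoop]

-- everything the loop invariant needs to know about one round
lemma pv_bfsRound_main (edges : List (Int × Int)) (S : PySem.Set Int) (F : List Int)
    (hS : S.Nodup) :
    (S ⊆ (pvBfsRound (pvBuildAdj edges) S F).1
     ∧ (pvBfsRound (pvBuildAdj edges) S F).1.Nodup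
     ∧ (pvBfsRound (pvBuildAdj edges) S F).2 ⊆ (pvBfsRound (pvBuildAdj edges) S F).1
     ∧ (∀ y ∈ (pvBfsRound (pvBuildAdj edges) S F).1, y ∈ S ∨ ∃ x ∈ F, pvAdjP edges x y)
     ∧ (∀ x ∈ F, (pvBuildAdj edges).getD x [] ⊆ (pvBfsRound (pvBuildAdj edges) S F).1)
     ∧ (∀ y ∈ (pvBfsRound (pvBuildAdj edges) S F).1, y ∈ S ∨ y ∈ (pvBfsRound (pvBuildAdj edges) S F).2)
     ∧ (∀ y ∈ (pvBfsRound (pvBuildAdj edges) S F).2, y ∉ S)) := by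
  -- invariant on the accumulator
  let P : PySem.Set Int × List Int → Prop := fun a =>
    S ⊆ a.1 ∧ a.1.Nodup ∧ a.2 ⊆ a.1
    ∧ (∀ y ∈ a.1, y ∈ S ∨ ∃ x ∈ F, pvAdjP edges x y)
    ∧ (∀ y ∈ a.1, y ∈ S ∨ y ∈ a.2)
    ∧ (∀ y ∈ a.2, y ∉ S)
  have inner : ∀ (ys : List Int), (∀ y ∈ ys, ∃ x ∈ F, pvAdjP edges x y) →
      ∀ (a : PySem.Set Int × List Int), P a →
      (P (ys.foldl (fun acc y => if y ∈ acc.1 then acc else (PySem.Set.add acc.1 y, acc.2 ++ [y])) a)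
       ∧ a.1 ⊆ (ys.foldl (fun acc y => if y ∈ acc.1 then acc else (PySem.Set.add acc.1 y, acc.2 ++ [y])) a).1
       ∧ ys ⊆ (ys.foldl (fun acc y => if y ∈ acc.1 then acc else (PySem.Set.add acc.1 y, acc.2 ++ [y])) a).1) := by
    intro ys
    induction ys with
    | nil => intro _ a ha; exact ⟨ha, fun _ h => h, by simp⟩
    | cons y ys ihy =>
      intro hys a ha
      have hyF : ∃ x ∈ F, pvAdjP edges x y := hys y List.mem_cons_self
      set a' := if y ∈ a.1 then a else (PySem.Set.add a.1 y, a.2 ++ [y]) with ha'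
      have hstep : P a' ∧ a.1 ⊆ a'.1 ∧ y ∈ a'.1 := by
        obtain ⟨p1, p2, p3, p4, p5, p6⟩ := ha
        by_cases h : y ∈ a.1
        · have hae : a' = a := by rw [ha', if_pos h]
          rw [hae]
          exact ⟨⟨p1, p2, p3, p4, p5, p6⟩, fun _ h => h, h⟩
        · have hae : a' = (PySem.Set.add a.1 y, a.2 ++ [y]) := by rw [ha', if_neg h]
          rw [hae]
          refine ⟨⟨List.Subset.trans p1 (pv_sub_add _ _), PySem.Set.nodup_add _ _ p2, ?_, ?_, ?_, ?_⟩,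
            pv_sub_add _ _, (PySem.Set.mem_add _ _ _).2 (Or.inr rfl)⟩
          · intro z hz
            rcases List.mem_append.1 hz with hz' | hz'
            · exact pv_sub_add _ _ (p3 hz')
            · simp only [List.mem_singleton] at hz'
              exact (PySem.Set.mem_add _ _ _).2 (Or.inr hz')
          · intro z hz
            rcases (PySem.Set.mem_add _ _ _).1 hz with hz' | hz'
            · exact p4 z hz'
            · exact hz' ▸ Or.inr hyF
          · intro z hz
            rcases (PySem.Set.mem_add _ _ _).1 hz with hz' | hz'
            · rcases p5 z hz' with h' | h'
              · exact Or.inl h'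
              · exact Or.inr (List.mem_append.2 (Or.inl h'))
            · exact Or.inr (List.mem_append.2 (Or.inr (by simp [hz'])))
          · intro z hz
            rcases List.mem_append.1 hz with hz' | hz'
            · exact p6 z hz'
            · simp only [List.mem_singleton] at hz'
              subst hz'
              exact fun hzS => h (p1 hzS)
      obtain ⟨hP', hsub', hy'⟩ := hstep
      obtain ⟨q1, q2, q3⟩ := ihy (fun z hz => hys z (List.mem_cons_of_mem _ hz)) a' hP'
      simp only [List.foldl_cons, ← ha']
      refine ⟨q1, List.Subset.trans hsub' q2, ?_⟩
      intro z hz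
      rcases List.mem_cons.1 hz with hz' | hz'
      · exact hz' ▸ q2 hy'
      · exact q3 hz'
  have outer : ∀ (fl : List Int), fl ⊆ F → ∀ (a : PySem.Set Int × List Int), P a →
      (P (fl.foldl (fun acc x => ((pvBuildAdj edges).getD x []).foldl
            (fun acc y => if y ∈ acc.1 then acc else (PySem.Set.add acc.1 y, acc.2 ++ [y])) acc) a)
       ∧ a.1 ⊆ (fl.foldl (fun acc x => ((pvBuildAdj edges).getD x []).foldl
            (fun acc y => if y ∈ acc.1 then acc else (PySem.Set.add acc.1 y, acc.2 ++ [y])) acc) a).1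
       ∧ ∀ x ∈ fl, (pvBuildAdj edges).getD x [] ⊆
           (fl.foldl (fun acc x => ((pvBuildAdj edges).getD x []).foldl
            (fun acc y => if y ∈ acc.1 then acc else (PySem.Set.add acc.1 y, acc.2 ++ [y])) acc) a).1) := by
    intro fl
    induction fl with
    | nil => intro _ a ha; exact ⟨ha, fun _ h => h, by simp⟩
    | cons x fl ihx =>
      intro hfl a ha
      have hxF : x ∈ F := hfl List.mem_cons_self
      obtain ⟨r1, r2, r3⟩ := inner ((pvBuildAdj edges).getD x [])
        (fun y hy => ⟨x, hxF, (pv_mem_adj edges x y).1 hy⟩) a ha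
      obtain ⟨q1, q2, q3⟩ := ihx (fun z hz => hfl (List.mem_cons_of_mem _ hz)) _ r1
      simp only [List.foldl_cons]
      refine ⟨q1, List.Subset.trans r2 q2, ?_⟩
      intro z hz
      rcases List.mem_cons.1 hz with hz' | hz'
      · subst hz'
        exact List.Subset.trans r3 q2
      · exact q3 z hz'
  have hP0 : P (S, []) :=
    ⟨fun _ h => h, hS, by simp, fun y hy => Or.inl hy, fun y hy => Or.inl hy, by simp⟩
  obtain ⟨⟨p1, p2, p3, p4, p5, p6⟩, _, h3⟩ := outer F (fun _ h => h) (S, []) hP0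
  exact ⟨p1, p2, p3, p4, h3, p5, p6⟩

lemma pv_bfsLoop_main (edges : List (Int × Int)) :
    ∀ (fuel : Nat) (S : PySem.Set Int) (F : List Int),
      S ⊆ pvU edges → F ⊆ S → S.Nodup →
      (∀ x ∈ S, pvReach edges x) →
      (∀ x ∈ S, x ∈ F ∨ (pvBuildAdj edges).getD x [] ⊆ S) →
      pvM edges S < fuel →
      (S ⊆ pvBfsLoop (pvBuildAdj edges) fuel S F
       ∧ (pvBfsLoop (pvBuildAdj edges) fuel S F).Nodup
       ∧ (∀ x ∈ pvBfsLoop (pvBuildAdj edges) fuel S F, pvReach edges x)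
       ∧ (∀ x ∈ pvBfsLoop (pvBuildAdj edges) fuel S F,
            (pvBuildAdj edges).getD x [] ⊆ pvBfsLoop (pvBuildAdj edges) fuel S F)) := by
  intro fuel
  induction fuel with
  | zero => intro S F _ _ _ _ _ hM; omega
  | succ fuel ih =>
    intro S F hSU hFS hSnd hSR hcl hM
    by_cases hF : F.isEmpty
    · simp only [pvBfsLoop, hF, if_true]
      refine ⟨fun _ h => h, hSnd, hSR, ?_⟩
      intro x hx
      rcases hcl x hx with h | h
      · rw [List.isEmpty_iff] at hF
        simp [hF] at h
      · exact h
    · simp only [pvBfsLoop, hF, Bool.false_eq_true, if_false]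
      obtain ⟨r1, r2, r3, r4, r5, r6, r7⟩ := pv_bfsRound_main edges S F hSnd
      set r := pvBfsRound (pvBuildAdj edges) S F with hr
      have hr1U : r.1 ⊆ pvU edges := by
        intro y hy
        rcases r4 y hy with h | h
        · exact hSU h
        · obtain ⟨x, _, hadj⟩ := h
          exact pv_adj_sub_U edges x ((pv_mem_adj edges x y).2 hadj)
      have hr1R : ∀ x ∈ r.1, pvReach edges x := by
        intro y hy
        rcases r4 y hy with h | h
        · exact hSR y h
        · obtain ⟨x, hxF, hadj⟩ := h
          exact Relation.ReflTransGen.tail (hSR x (hFS hxF)) hadj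
      have hr1cl : ∀ x ∈ r.1, x ∈ r.2 ∨ (pvBuildAdj edges).getD x [] ⊆ r.1 := by
        intro x hx
        rcases r6 x hx with h | h
        · rcases hcl x h with h' | h'
          · exact Or.inr (r5 x h')
          · exact Or.inr (List.Subset.trans h' r1)
        · exact Or.inl h
      by_cases h2 : r.2 = []
      · rw [h2, pv_bfsLoop_nil]
        refine ⟨r1, r2, hr1R, ?_⟩
        intro x hx
        rcases hr1cl x hx with h | h
        · rw [h2] at h; simp at h
        · exact h
      · obtain ⟨y, hy⟩ := List.exists_mem_of_ne_nil r.2 h2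
        have hM' : pvM edges r.1 < fuel := by
          have : pvM edges r.1 < pvM edges S :=
            pvM_lt r1 (hr1U (r3 hy)) (r7 y hy) (r3 hy)
          omega
        obtain ⟨q1, q2, q3, q4⟩ := ih r.1 r.2 hr1U r3 r2 hr1R hr1cl hM'
        exact ⟨List.Subset.trans r1 q1, q2, q3, q4⟩

lemma pv_bfsLoop_char (edges : List (Int × Int)) (x : Int) :
    x ∈ pvBfsLoop (pvBuildAdj edges) (2 * edges.length + 2) [0] [0] ↔ pvReach edges x := by
  obtain ⟨q1, _, q3, q4⟩ := pv_bfsLoop_main edges (2 * edges.length + 2) [0] [0]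
    (pv_zero_mem_U edges) (fun _ h => h) (by simp)
    (by intro z hz; simp only [List.mem_singleton] at hz; exact hz ▸ Relation.ReflTransGen.refl)
    (fun z hz => Or.inl hz)
    (by have := pvM_zero_lt edges; omega)
  constructor
  · exact q3 x
  · exact pv_reach_sub edges _ (q1 (List.mem_singleton.2 rfl)) q4 x

-- nodup of the BFS result, starting from [0]
lemma pv_bfsLoop_nodup (edges : List (Int × Int)) :
    (pvBfsLoop (pvBuildAdj edges) (2 * edges.length + 2) [0] [0]).Nodup := by
  obtain ⟨_, q2, _, _⟩ := pv_bfsLoop_main edges (2 * edges.length + 2) [0] [0]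
    (pv_zero_mem_U edges) (fun _ h => h) (by simp)
    (by intro z hz; simp only [List.mem_singleton] at hz; exact hz ▸ Relation.ReflTransGen.refl)
    (fun z hz => Or.inl hz)
    (by have := pvM_zero_lt edges; omega)
  exact q2

-- ===== VERDICT (by name: the statement is the Claim_ definition above) =====
theorem validTreeDFSRec_spec : Claim_equal_validTreeDFSRec := by
  intro n edges _
  unfold Spec_validTreeDFSRec validTreeDFSRec validTreeDFSRec_alt
  by_cases hg : (edges.length : Int) ≠ n - 1
  · simp [hg]
  · simp only [hg, if_false]
    have e0 : (PySem.Set.add PySem.Set.empty (0 : Int)) = [0] := rfl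
    rw [e0]
    have hndA : (pvDfsA (pvBuildAdj edges) (2 * edges.length + 1) 0 [0]).Nodup :=
      pv_dfsA_nodup _ _ _ _ (by simp)
    have hndB := pv_bfsLoop_nodup edges
    have hperm : (pvDfsA (pvBuildAdj edges) (2 * edges.length + 1) 0 [0]).Perm
        (pvBfsLoop (pvBuildAdj edges) (2 * edges.length + 2) [0] [0]) :=
      (List.perm_ext_iff_of_nodup hndA hndB).2
        (fun a => (pv_dfsA_char edges a).trans (pv_bfsLoop_char edges a).symm)
    simp [PySem.Set.len, hperm.length_eq]
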